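-- pv_equiv track=rewrite | github.com/Anton-Dahlstrom/Leetcode | 3905_multi_score_flood_fill.py | colorGrid
-- ===== SOURCE A (Python) =====
-- def colorGrid(n: int, m: int, sources: list[list[int]]) -> list[list[int]]:
--     directions = [(0, 1), (0, -1), (1, 0), (-1, 0)]
--     sources.sort(key=lambda x: x[2], reverse=True)
--     grid = [[0]*m for _ in range(n)]
--
--     def colorCell(row, col, color, grid):
--         if row in range(0, len(grid)) and col in range(0, len(grid[0])) and grid[row][col] == 0:
--             grid[row][col] = color
--             return True
--         return False
--
--     for row, col, color in sources:
--         grid[row][col] = color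
--     while sources:
--         temp = []
--         for row, col, color in sources:
--             for drow, dcol in directions:
--                 nrow, ncol = row+drow, col+dcol
--                 if colorCell(nrow, ncol, color, grid):
--                     temp.append([nrow, ncol, color])
--         sources = temp
--     return grid
-- ===== SOURCE B (Python) =====
-- def colorGrid(n: int, m: int, sources: list[list[int]]) -> list[list[int]]:
--     # Same observable in-place sort as A; B's result uses it only for duplicate seed positions.
--     sources.sort(key=lambda x: x[2], reverse=True)
--     seed = {}
--     for r, c, col in sources:
--         seed[(r, c)] = col
--
--     def cellColor(i, j):
--         if (i, j) in seed:
--             return seed[(i, j)]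
--         best = None  # (distance, color) of the best source so far: nearest, ties to the largest color
--         for r, c, col in sources:
--             d = abs(r - i) + abs(c - j)
--             if best is None or d < best[0] or (d == best[0] and col > best[1]):
--                 best = (d, col)
--         return best[1] if best is not None else 0
--
--     return [[cellColor(i, j) for j in range(m)] for i in range(n)]
-- ===== Notes on version B (the rewrite author's own statement) =====
-- stated objective: alternative
-- what changed: Replaces A's multi-source BFS wave propagation entirely by a per-cell closed form: each non-source cell is colored directly with the color of its nearest source under Manhattan distance, ties to the largest color, which provably reproduces the BFS wave order; no queue, no grid mutation.
-- outside the precondition, e.g. on colorGrid(2, 1, [[-1, 0, 5], [0, 0, 9]]): A returns [[9], [5]], B returns [[9], [9]]; on colorGrid(2, 1, [[0, 0, 0], [1, 0, 7]]): A returns [[7], [7]], B returns [[0], [7]]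
import Mathlib
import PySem

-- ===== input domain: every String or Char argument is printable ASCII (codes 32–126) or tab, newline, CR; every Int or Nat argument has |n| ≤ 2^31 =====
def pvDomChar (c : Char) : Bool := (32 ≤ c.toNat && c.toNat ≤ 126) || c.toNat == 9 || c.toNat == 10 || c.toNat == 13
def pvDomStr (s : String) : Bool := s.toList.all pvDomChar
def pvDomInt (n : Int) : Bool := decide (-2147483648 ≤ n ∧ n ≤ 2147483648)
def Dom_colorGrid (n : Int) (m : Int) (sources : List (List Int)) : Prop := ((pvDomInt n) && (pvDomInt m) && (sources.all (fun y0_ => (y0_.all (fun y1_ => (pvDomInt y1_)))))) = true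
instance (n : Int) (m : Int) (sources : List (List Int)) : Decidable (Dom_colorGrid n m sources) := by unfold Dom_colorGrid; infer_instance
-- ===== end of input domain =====

-- B replaces A's multi-source BFS by a per-cell closed form (nearest source under Manhattan
-- distance, ties to the largest color); both A and B sort `sources` in place (same observable
-- mutation); return values proved equal on Pre_.

-- ===== PORT A =====
-- Python's list-index rule for a valid index (negative index counts from the end)
def pvPyIdx (len : Nat) (i : Int) : Nat := (if i < 0 then i + (len : Int) else i).toNat

-- sort key x[2] (raises IndexError when len < 3: outside Pre_, port defaults to 0)
def pvKey (s : List Int) : Int := (PySem.List.pyGet? s 2).getD 0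

-- grid[r][c] = v ; exact whenever the indices are valid (guaranteed by Pre_ / the guards)
def pvSeedCell (g : List (List Int)) (r c v : Int) : List (List Int) :=
  g.set (pvPyIdx g.length r)
    ((g.getD (pvPyIdx g.length r) []).set
      (pvPyIdx (g.getD (pvPyIdx g.length r) []).length c) v)

-- for row, col, color in sources: grid[row][col] = color   (a non-3 row raises in Python: outside Pre_)
def pvSeed (g : List (List Int)) (srcs : List (List Int)) : List (List Int) :=
  srcs.foldl (fun g s => match s with
    | [r, c, col] => pvSeedCell g r c col
    | _ => g) g

-- grid[r][c]; only used under 0 ≤ r < len guards, where it is exact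
def pvGetCell (g : List (List Int)) (r c : Int) : Int :=
  (g.getD r.toNat []).getD c.toNat 0

def pvDirs : List (Int × Int) := [(0, 1), (0, -1), (1, 0), (-1, 0)]

-- A's colorCell: returns (bool, updated grid) instead of mutating
def pvColorCell (row col color : Int) (g : List (List Int)) : Bool × List (List Int) :=
  if 0 ≤ row ∧ row < (g.length : Int) ∧ 0 ≤ col ∧ col < ((g.headD []).length : Int) ∧
      pvGetCell g row col = 0 then
    (true, pvSeedCell g row col color)
  else (false, g)

-- body of A's `for row, col, color in sources: for drow, dcol in directions: …` with state (grid, temp)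
def pvLevelStep (st : List (List Int) × List (List Int)) (s : List Int) :
    List (List Int) × List (List Int) :=
  match s with
  | [row, col, color] =>
    pvDirs.foldl (fun st d =>
      let nrow := row + d.1
      let ncol := col + d.2
      let p := pvColorCell nrow ncol color st.1
      if p.1 then (p.2, st.2 ++ [[nrow, ncol, color]]) else (p.2, st.2)) st
  | _ => st   -- Python raises on unpacking: outside Pre_

-- one iteration of A's while loop: temp starts empty
def pvLevel (g : List (List Int)) (srcs : List (List Int)) :
    List (List Int) × List (List Int) :=
  srcs.foldl pvLevelStep (g, [])

-- A's `while sources:` loop; the fuel bounds the number of iterations (proved sufficient under Pre_)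
def pvLoopA : Nat → List (List Int) → List (List Int) → List (List Int)
  | 0, g, _ => g
  | f + 1, g, srcs =>
    if srcs = [] then g
    else
      let p := pvLevel g srcs
      pvLoopA f p.1 p.2

def colorGrid (n : Int) (m : Int) (sources : List (List Int)) : List (List Int) :=
  let ss := PySem.List.sorted sources pvKey true
  let g0 := List.replicate n.toNat (List.replicate m.toNat 0)
  let g1 := pvSeed g0 ss
  pvLoopA (n.toNat * m.toNat + 2) g1 ss

-- ===== PORT B =====
-- seed = {}; for r, c, col in sources: seed[(r, c)] = col
def pvSeedDict (ss : List (List Int)) : PySem.Dict (Int × Int) Int :=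
  ss.foldl (fun d s => match s with
    | [r, c, col] => d.insert (r, c) col
    | _ => d) PySem.Dict.empty   -- a non-3 row raises on unpacking in Python: outside Pre_

-- body of B's `for r, c, col in sources:` loop updating `best`
def pvBestStep (i j : Int) (best : Option (Int × Int)) (s : List Int) : Option (Int × Int) :=
  match s with
  | [r, c, col] =>
    let d := |r - i| + |c - j|
    match best with
    | none => some (d, col)
    | some b => if d < b.1 ∨ (d = b.1 ∧ col > b.2) then some (d, col) else some b
  | _ => best   -- outside Pre_

-- B's cellColor(i, j)
def pvCellColor (seed : PySem.Dict (Int × Int) Int) (ss : List (List Int)) (i j : Int) : Int :=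
  match seed.get? (i, j) with
  | some v => v
  | none =>
    match ss.foldl (pvBestStep i j) none with
    | some b => b.2
    | none => 0

def colorGrid_alt (n : Int) (m : Int) (sources : List (List Int)) : List (List Int) :=
  let ss := PySem.List.sorted sources pvKey true
  let seed := pvSeedDict ss
  (PySem.List.pyRange 0 n 1).map (fun i =>
    (PySem.List.pyRange 0 m 1).map (fun j => pvCellColor seed ss i j))

-- ===== PRECONDITION & SPEC =====
def pvOkSrc (n m : Int) (s : List Int) : Bool :=
  match s with
  | [r, c, col] =>
    decide (0 ≤ r) && decide (r < n) && decide (0 ≤ c) && decide (c < m) && !(col == 0)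
  | _ => false

-- Pre_ excludes source rows not of length 3 and coordinates outside [0,n)×[0,m): Python A raises
-- on out-of-range ones, and on negative ones its seeding wraps around (Python negative indexing)
-- while its BFS bound check does not — an accidental mix of the two conventions; it also excludes
-- zero-color sources, whose color coincides with A's 'uncolored' sentinel and makes A's BFS
-- re-color 0 cells forever on all but degenerate inputs.
def Pre_colorGrid (n : Int) (m : Int) (sources : List (List Int)) : Prop :=
  sources.all (pvOkSrc n m) = true

instance (n : Int) (m : Int) (sources : List (List Int)) : Decidable (Pre_colorGrid n m sources) := by
  unfold Pre_colorGrid; infer_instance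

def pvWitness_colorGrid : Int × Int × List (List Int) := (2, 2, [[0, 0, 5], [1, 1, -3]])

def Spec_colorGrid (n : Int) (m : Int) (sources : List (List Int)) (out : List (List Int)) : Prop := out = colorGrid_alt n m sources
instance (n : Int) (m : Int) (sources : List (List Int)) (out : List (List Int)) : Decidable (Spec_colorGrid n m sources out) := by unfold Spec_colorGrid; infer_instance

-- ===== CLAIM (what is proved, stated in full; the proofs are below) =====
def Claim_equal_colorGrid : Prop := ∀ (n : Int) (m : Int) (sources : List (List Int)), Dom_colorGrid n m sources → Pre_colorGrid n m sources → Spec_colorGrid n m sources (colorGrid n m sources)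

-- ===== LEMMAS AND PROOFS =====

-- ---------- basic grid facts ----------

-- grid shape invariant: n.toNat rows, each of length m.toNat
def pvDims (n m : Int) (g : List (List Int)) : Prop :=
  g.length = n.toNat ∧ ∀ row ∈ g, row.length = m.toNat

-- number of cells equal to 0
def pvZeros (g : List (List Int)) : Nat := (g.map (fun row => row.count 0)).sum

-- cell is inside the grid
abbrev pvIn (n m i j : Int) : Prop := 0 ≤ i ∧ i < n ∧ 0 ≤ j ∧ j < m

theorem pv_sum_set_nat (l : List Nat) (i : Nat) (x : Nat) (h : i < l.length) :
    (l.set i x).sum + l[i] = l.sum + x := by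
  induction l generalizing i with
  | nil => simp at h
  | cons a t ih =>
    cases i with
    | zero => simp [List.set]; omega
    | succ j =>
      simp only [List.set, List.sum_cons, List.getElem_cons_succ]
      have := ih j (by simpa using h)
      omega

theorem pv_count_set (row : List Int) (ci : Nat) (v : Int) (h : ci < row.length)
    (h0 : row[ci] = 0) (hv : v ≠ 0) :
    (row.set ci v).count 0 + 1 = row.count 0 := by
  have hs : row.set ci v = row.take ci ++ v :: row.drop (ci + 1) := by
    rw [List.set_eq_take_append_cons_drop, if_pos h]
  have hr : row = row.take ci ++ row[ci] :: row.drop (ci + 1) := by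
    conv_lhs => rw [← List.take_append_drop ci row, ← List.getElem_cons_drop h]
  have hv' : (v == (0 : Int)) = false := by simpa using hv
  rw [hs]; conv_rhs => rw [hr]
  simp [List.count_append, List.count_cons, h0, hv']
  omega

theorem pv_getD_lt {α : Type} (l : List α) (i : Nat) (d : α) (h : i < l.length) :
    l.getD i d = l[i] := by
  simp [List.getD_eq_getElem?_getD, List.getElem?_eq_getElem h]

theorem pv_seedCell_dims {n m : Int} {g : List (List Int)} (hd : pvDims n m g)
    (r c v : Int) : pvDims n m (pvSeedCell g r c v) := by
  obtain ⟨hl, hrows⟩ := hd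
  unfold pvSeedCell
  by_cases hR : pvPyIdx g.length r < g.length
  · refine ⟨by simpa using hl, ?_⟩
    intro row hmem
    rcases List.mem_or_eq_of_mem_set hmem with h | h
    · exact hrows _ h
    · subst h
      rw [List.length_set, pv_getD_lt _ _ _ hR]
      exact hrows _ (List.getElem_mem hR)
  · rw [List.set_eq_of_length_le (by omega)]
    exact ⟨hl, hrows⟩

theorem pv_seedCell_in {n m : Int} {g : List (List Int)} (hd : pvDims n m g)
    {r c : Int} (hr0 : 0 ≤ r) (hrn : r < n) (hc0 : 0 ≤ c) (hcm : c < m) (v : Int) :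
    pvSeedCell g r c v = g.set r.toNat ((g.getD r.toNat []).set c.toNat v) := by
  obtain ⟨hl, hrows⟩ := hd
  have hR : r.toNat < g.length := by omega
  have hrowD : g.getD r.toNat [] = g[r.toNat] := pv_getD_lt _ _ _ hR
  have hidr : pvPyIdx g.length r = r.toNat := by unfold pvPyIdx; rw [if_neg (by omega)]
  have hC : c.toNat < (g[r.toNat]).length := by
    have := hrows _ (List.getElem_mem hR); omega
  unfold pvSeedCell
  rw [hidr]
  have hidc : pvPyIdx (g.getD r.toNat []).length c = c.toNat := by
    unfold pvPyIdx; rw [hrowD, if_neg (by omega)]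
  rw [hidc]

-- a guarded in-bounds write of v ≠ 0 on a 0 cell removes exactly one zero
theorem pv_seedCell_zeros {n m : Int} {g : List (List Int)} (hd : pvDims n m g)
    {r c v : Int} (hr0 : 0 ≤ r) (hrn : r < n) (hc0 : 0 ≤ c) (hcm : c < m)
    (h0 : pvGetCell g r c = 0) (hv : v ≠ 0) :
    pvZeros (pvSeedCell g r c v) + 1 = pvZeros g := by
  obtain ⟨hl, hrows⟩ := hd
  have hR : r.toNat < g.length := by omega
  have hrowD : g.getD r.toNat [] = g[r.toNat] := pv_getD_lt _ _ _ hR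
  have hmem : g[r.toNat] ∈ g := List.getElem_mem hR
  have hC : c.toNat < (g[r.toNat]).length := by have := hrows _ hmem; omega
  have hcell : g[r.toNat][c.toNat] = 0 := by
    have hg : pvGetCell g r c = g[r.toNat][c.toNat] := by
      rw [pvGetCell, hrowD, pv_getD_lt _ _ _ hC]
    rw [hg] at h0; exact h0
  rw [pv_seedCell_in ⟨hl, hrows⟩ hr0 hrn hc0 hcm v, hrowD]
  unfold pvZeros
  rw [List.map_set]
  have h1 := pv_sum_set_nat (g.map fun row => row.count 0) r.toNat
    ((g[r.toNat].set c.toNat v).count 0) (by simpa using hR)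
  have h2 := pv_count_set g[r.toNat] c.toNat v hC hcell hv
  simp only [List.getElem_map] at h1
  omega

-- reading a cell after a guarded in-bounds write
theorem pv_get_seedCell {n m : Int} {g : List (List Int)} (hd : pvDims n m g)
    {r c : Int} (hr : pvIn n m r c) (v : Int) {i j : Int} (hij : pvIn n m i j) :
    pvGetCell (pvSeedCell g r c v) i j = if i = r ∧ j = c then v else pvGetCell g i j := by
  obtain ⟨hl, hrows⟩ := hd
  obtain ⟨hr0, hrn, hc0, hcm⟩ := hr
  obtain ⟨hi0, hin, hj0, hjm⟩ := hij
  have hR : r.toNat < g.length := by omega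
  have hI : i.toNat < g.length := by omega
  have hrowD : g.getD r.toNat [] = g[r.toNat] := pv_getD_lt _ _ _ hR
  have hC : c.toNat < (g[r.toNat]).length := by
    have := hrows _ (List.getElem_mem hR); omega
  have hJr : j.toNat < (g[r.toNat]).length := by
    have := hrows _ (List.getElem_mem hR); omega
  have hJi : j.toNat < (g[i.toNat]).length := by
    have := hrows _ (List.getElem_mem hI); omega
  rw [pv_seedCell_in ⟨hl, hrows⟩ hr0 hrn hc0 hcm v, hrowD]
  unfold pvGetCell
  have hIset : i.toNat < (g.set r.toNat (g[r.toNat].set c.toNat v)).length := by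
    simpa using hI
  by_cases hir : i = r
  · subst hir
    rw [pv_getD_lt _ _ _ hIset, List.getElem_set_self (by simpa using hI)]
    by_cases hjc : j = c
    · subst hjc
      have hJs : j.toNat < (g[i.toNat].set j.toNat v).length := by simpa using hJr
      rw [pv_getD_lt _ _ _ hJs, List.getElem_set_self (by simpa using hJr), if_pos ⟨rfl, rfl⟩]
    · have hne : c.toNat ≠ j.toNat := by omega
      have hJs : j.toNat < (g[i.toNat].set c.toNat v).length := by simpa using hJr
      rw [pv_getD_lt _ _ _ hJs,
        List.getElem_set_ne hne, if_neg (fun h => hjc h.2),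
        pv_getD_lt _ _ _ hI, pv_getD_lt _ _ _ hJi]
  · have hne : r.toNat ≠ i.toNat := by omega
    rw [pv_getD_lt _ _ _ hIset, List.getElem_set_ne hne, if_neg (fun h => hir h.1),
      pv_getD_lt _ _ _ hI, pv_getD_lt _ _ _ hJi]

-- A's guard in colorCell, rephrased over the logical bounds (dimension-correct grids)
theorem pv_cond_eq {n m : Int} {g : List (List Int)} (hd : pvDims n m g) (r c : Int) :
    (0 ≤ r ∧ r < (g.length : Int) ∧ 0 ≤ c ∧ c < ((g.headD []).length : Int) ∧
        pvGetCell g r c = 0)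
      ↔ (pvIn n m r c ∧ pvGetCell g r c = 0) := by
  obtain ⟨hl, hrows⟩ := hd
  unfold pvIn
  cases g with
  | nil =>
    simp only [List.length_nil] at hl ⊢
    constructor
    · rintro ⟨h1, h2, h3, h4, h5⟩; exact absurd h2 (by omega)
    · rintro ⟨⟨h1, h2, h3, h4⟩, h5⟩; exact absurd h2 (by omega)
  | cons row t =>
    have hrow : row.length = m.toNat := hrows row List.mem_cons_self
    have hlen : (row :: t).length = n.toNat := hl
    simp only [List.headD_cons]
    constructor
    · rintro ⟨h1, h2, h3, h4, h5⟩
      exact ⟨⟨h1, by rw [hlen] at *; omega, h3, by rw [hrow] at *; omega⟩, h5⟩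
    · rintro ⟨⟨h1, h2, h3, h4⟩, h5⟩
      exact ⟨h1, by rw [hlen] at *; omega, h3, by rw [hrow] at *; omega, h5⟩

-- the all-zero starting grid
theorem pv_g0_dims (n m : Int) :
    pvDims n m (List.replicate n.toNat (List.replicate m.toNat 0)) := by
  refine ⟨by simp, ?_⟩
  intro row hr
  rw [List.eq_of_mem_replicate hr]; simp

theorem pv_g0_get (n m : Int) {i j : Int} (hij : pvIn n m i j) :
    pvGetCell (List.replicate n.toNat (List.replicate m.toNat 0)) i j = 0 := by
  obtain ⟨hi0, hin, hj0, hjm⟩ := hij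
  have hI : i.toNat < (List.replicate n.toNat (List.replicate m.toNat (0 : Int))).length := by
    simp; omega
  unfold pvGetCell
  rw [pv_getD_lt _ _ _ hI, List.getElem_replicate]
  have hJ : j.toNat < (List.replicate m.toNat (0 : Int)).length := by simp; omega
  rw [pv_getD_lt _ _ _ hJ, List.getElem_replicate]

-- ---------- sources, Manhattan distance, nearest/maximal color ----------

def pvRow (s : List Int) : Int := s.getD 0 0
def pvCol (s : List Int) : Int := s.getD 1 0
def pvClr (s : List Int) : Int := s.getD 2 0

-- Manhattan distance from the source (or queue entry) s to the cell (i, j)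
def pvDd (s : List Int) (i j : Int) : Int := |pvRow s - i| + |pvCol s - j|

-- minimal source distance to (i, j)
def pvMind (ss : List (List Int)) (i j : Int) : Option Int :=
  (ss.map (fun s => pvDd s i j)).min?

-- the sources at distance exactly d from (i, j), and the largest color among them
def pvAtD (ss : List (List Int)) (i j d : Int) : List (List Int) :=
  ss.filter (fun s => pvDd s i j == d)

def pvMx (ss : List (List Int)) (i j d : Int) : Int :=
  ((pvAtD ss i j d).map pvClr).max?.getD 0

-- well-formed source lists (what Pre_ guarantees after sorting)
def pvOkList (n m : Int) (ss : List (List Int)) : Prop :=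
  ∀ s ∈ ss, ∃ r c col, s = [r, c, col] ∧ pvIn n m r c ∧ col ≠ 0

theorem pv_dd_triple (r c col i j : Int) : pvDd [r, c, col] i j = |r - i| + |c - j| := rfl

theorem pv_dd_nonneg (s : List Int) (i j : Int) : 0 ≤ pvDd s i j := by
  unfold pvDd; positivity

theorem pv_dd_zero {r c col i j : Int} :
    pvDd [r, c, col] i j = 0 ↔ r = i ∧ c = j := by
  rw [pv_dd_triple, Int.abs_eq_natAbs, Int.abs_eq_natAbs]; omega

-- |d(s,x) - d(s,y)| ≤ d(x,y) (Manhattan triangle inequality)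
theorem pv_dd_triangle (s : List Int) (i j i' j' : Int) :
    pvDd s i j ≤ pvDd s i' j' + (|i - i'| + |j - j'|) := by
  unfold pvDd
  rw [Int.abs_eq_natAbs, Int.abs_eq_natAbs, Int.abs_eq_natAbs, Int.abs_eq_natAbs,
    Int.abs_eq_natAbs, Int.abs_eq_natAbs]
  omega

-- step one cell from (i,j) toward the source s: an in-grid neighbour one closer to s
theorem pv_toward {n m r c col i j d : Int} (hs : pvIn n m r c) (hij : pvIn n m i j)
    (hd : pvDd [r, c, col] i j = d) (h1 : 1 ≤ d) :
    ∃ i' j', pvIn n m i' j' ∧ |i - i'| + |j - j'| = 1 ∧ pvDd [r, c, col] i' j' = d - 1 := by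
  obtain ⟨hr0, hrn, hc0, hcm⟩ := hs
  obtain ⟨hi0, hin, hj0, hjm⟩ := hij
  rw [pv_dd_triple, Int.abs_eq_natAbs, Int.abs_eq_natAbs] at hd
  by_cases hri : r < i
  · refine ⟨i - 1, j, ⟨by omega, by omega, hj0, hjm⟩, by rw [Int.abs_eq_natAbs, Int.abs_eq_natAbs]; omega, ?_⟩
    rw [pv_dd_triple, Int.abs_eq_natAbs, Int.abs_eq_natAbs]; omega
  · by_cases hir : i < r
    · refine ⟨i + 1, j, ⟨by omega, by omega, hj0, hjm⟩, by rw [Int.abs_eq_natAbs, Int.abs_eq_natAbs]; omega, ?_⟩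
      rw [pv_dd_triple, Int.abs_eq_natAbs, Int.abs_eq_natAbs]; omega
    · by_cases hcj : c < j
      · refine ⟨i, j - 1, ⟨hi0, hin, by omega, by omega⟩, by rw [Int.abs_eq_natAbs, Int.abs_eq_natAbs]; omega, ?_⟩
        rw [pv_dd_triple, Int.abs_eq_natAbs, Int.abs_eq_natAbs]; omega
      · refine ⟨i, j + 1, ⟨hi0, hin, by omega, by omega⟩, by rw [Int.abs_eq_natAbs, Int.abs_eq_natAbs]; omega, ?_⟩
        rw [pv_dd_triple, Int.abs_eq_natAbs, Int.abs_eq_natAbs]; omega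

-- characterisation of pvMind
theorem pv_mind_some_iff {ss : List (List Int)} {i j d : Int} :
    pvMind ss i j = some d ↔ ((∃ s ∈ ss, pvDd s i j = d) ∧ ∀ s ∈ ss, d ≤ pvDd s i j) := by
  unfold pvMind
  rw [List.min?_eq_some_iff]
  constructor
  · rintro ⟨h1, h2⟩
    obtain ⟨s, hs, hds⟩ := List.mem_map.mp h1
    exact ⟨⟨s, hs, hds⟩, fun s hsm => h2 _ (List.mem_map.mpr ⟨s, hsm, rfl⟩)⟩
  · rintro ⟨⟨s, hs, hds⟩, h2⟩
    refine ⟨List.mem_map.mpr ⟨s, hs, hds⟩, ?_⟩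
    intro b hb
    obtain ⟨s', hs', hds'⟩ := List.mem_map.mp hb
    exact hds' ▸ h2 s' hs'

theorem pv_mind_none_iff {ss : List (List Int)} {i j : Int} :
    pvMind ss i j = none ↔ ss = [] := by
  unfold pvMind
  rw [List.min?_eq_none_iff, List.map_eq_nil_iff]

theorem pv_mind_nonneg {ss : List (List Int)} {i j d : Int} (h : pvMind ss i j = some d) :
    0 ≤ d := by
  obtain ⟨⟨s, hs, hds⟩, _⟩ := pv_mind_some_iff.mp h
  have := pv_dd_nonneg s i j; omega

-- pvMx is attained and is an upper bound
theorem pv_mx_attained {ss : List (List Int)} {i j d : Int}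
    (h : ∃ s ∈ ss, pvDd s i j = d) :
    ∃ s ∈ ss, pvDd s i j = d ∧ pvClr s = pvMx ss i j d := by
  obtain ⟨s, hs, hds⟩ := h
  have hmem : s ∈ pvAtD ss i j d := List.mem_filter.mpr ⟨hs, by simpa using hds⟩
  cases hmax : ((pvAtD ss i j d).map pvClr).max? with
  | none =>
    rw [List.max?_eq_none_iff, List.map_eq_nil_iff] at hmax
    rw [hmax] at hmem; simp at hmem
  | some v =>
    obtain ⟨s', hs', hclr⟩ := List.mem_map.mp (List.max?_mem hmax)
    have hs'f := List.mem_filter.mp hs'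
    refine ⟨s', hs'f.1, by simpa using hs'f.2, ?_⟩
    rw [pvMx, hmax, Option.getD_some, hclr]

theorem pv_mx_ub {ss : List (List Int)} {i j d : Int} {s : List Int}
    (hs : s ∈ ss) (hds : pvDd s i j = d) : pvClr s ≤ pvMx ss i j d := by
  have hmem : pvClr s ∈ (pvAtD ss i j d).map pvClr :=
    List.mem_map.mpr ⟨s, List.mem_filter.mpr ⟨hs, by simpa using hds⟩, rfl⟩
  cases hmax : ((pvAtD ss i j d).map pvClr).max? with
  | none =>
    rw [List.max?_eq_none_iff] at hmax
    rw [hmax] at hmem; simp at hmem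
  | some v =>
    rw [pvMx, hmax, Option.getD_some]
    exact (List.max?_eq_some_iff.mp hmax).2 _ hmem

theorem pv_mx_ne_zero {n m : Int} {ss : List (List Int)} (hok : pvOkList n m ss)
    {i j d : Int} (h : ∃ s ∈ ss, pvDd s i j = d) : pvMx ss i j d ≠ 0 := by
  obtain ⟨s, hs, _, hclr⟩ := pv_mx_attained h
  obtain ⟨r, c, col, rfl, _, hcol⟩ := hok s hs
  rw [← hclr]; exact hcol

-- ---------- the seed dictionary vs A's seeding pass ----------

theorem pv_seed_dims {n m : Int} :
    ∀ (srcs : List (List Int)) (g : List (List Int)), pvDims n m g →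
      pvDims n m (pvSeed g srcs) := by
  intro srcs
  induction srcs with
  | nil => intro g hd; simpa [pvSeed] using hd
  | cons s t ih =>
    intro g hd
    simp only [pvSeed, List.foldl_cons]
    show pvDims n m (pvSeed _ t)
    apply ih
    match s with
    | [] => exact hd
    | [_] => exact hd
    | [_, _] => exact hd
    | [r, c, col] => exact pv_seedCell_dims hd r c col
    | _ :: _ :: _ :: _ :: _ => exact hd

theorem pv_seedDict_append (t : List (List Int)) (r c col : Int) :
    pvSeedDict (t ++ [[r, c, col]]) = (pvSeedDict t).insert (r, c) col := by
  unfold pvSeedDict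
  rw [List.foldl_append]
  rfl

theorem pv_seed_append (g : List (List Int)) (t : List (List Int)) (r c col : Int) :
    pvSeed g (t ++ [[r, c, col]]) = pvSeedCell (pvSeed g t) r c col := by
  unfold pvSeed
  rw [List.foldl_append]
  rfl

theorem pv_seed_get {n m : Int} :
    ∀ {ss : List (List Int)}, pvOkList n m ss →
    ∀ {g : List (List Int)}, pvDims n m g → ∀ {i j : Int}, pvIn n m i j →
      pvGetCell (pvSeed g ss) i j = ((pvSeedDict ss).get? (i, j)).getD (pvGetCell g i j) := by
  intro ss
  induction ss using List.reverseRecOn with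
  | nil => intro _ g hd i j hij; simp [pvSeed, pvSeedDict]
  | append_singleton t s ih =>
    intro hok g hd i j hij
    obtain ⟨r, c, col, rfl, hin, hcol⟩ := hok s (by simp)
    have hokt : pvOkList n m t := fun s hs => hok s (by simp [hs])
    rw [pv_seed_append, pv_seedDict_append,
      pv_get_seedCell (pv_seed_dims t g hd) hin col hij,
      ih hokt hd hij]
    by_cases hrc : i = r ∧ j = c
    · obtain ⟨rfl, rfl⟩ := hrc
      rw [if_pos ⟨rfl, rfl⟩, PySem.Dict.get?_insert_self]
      rfl
    · have hne : (i, j) ≠ (r, c) := by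
        intro h; exact hrc ⟨congrArg Prod.fst h, congrArg Prod.snd h⟩
      rw [if_neg hrc, PySem.Dict.get?_insert_of_ne _ _ hne]

theorem pv_seedDict_none_iff {n m : Int} {ss : List (List Int)} (hok : pvOkList n m ss)
    {i j : Int} :
    (pvSeedDict ss).get? (i, j) = none ↔
      ∀ s ∈ ss, ¬(pvRow s = i ∧ pvCol s = j) := by
  induction ss using List.reverseRecOn with
  | nil =>
    constructor
    · intro _ s h; simp at h
    · intro _; rfl
  | append_singleton t s ih =>
    obtain ⟨r, c, col, rfl, hin, hcol⟩ := hok s (by simp)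
    have hokt : pvOkList n m t := fun s hs => hok s (by simp [hs])
    rw [pv_seedDict_append]
    constructor
    · intro h s' hs'
      by_cases hrc : (i, j) = (r, c)
      · rw [hrc, PySem.Dict.get?_insert_self] at h
        cases h
      · rw [PySem.Dict.get?_insert_of_ne _ _ hrc] at h
        rcases List.mem_append.mp hs' with h' | h'
        · exact (ih hokt).mp h s' h'
        · rw [List.mem_singleton.mp h']
          rintro ⟨h1, h2⟩
          exact hrc (by simp [pvRow, pvCol] at h1 h2; simp [← h1, ← h2])
    · intro h
      have hrc : (i, j) ≠ (r, c) := by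
        intro he
        have h1 : i = r := congrArg Prod.fst he
        have h2 : j = c := congrArg Prod.snd he
        exact h [r, c, col] (by simp) ⟨by simp [pvRow, h1], by simp [pvCol, h2]⟩
      rw [PySem.Dict.get?_insert_of_ne _ _ hrc]
      exact (ih hokt).mpr (fun s' hs' => h s' (by simp [hs']))

theorem pv_seedDict_some {n m : Int} {ss : List (List Int)} (hok : pvOkList n m ss)
    {i j v : Int} (h : (pvSeedDict ss).get? (i, j) = some v) :
    ∃ s ∈ ss, pvRow s = i ∧ pvCol s = j ∧ pvClr s = v := by
  induction ss using List.reverseRecOn with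
  | nil => simp [pvSeedDict] at h
  | append_singleton t s ih =>
    obtain ⟨r, c, col, rfl, hin, hcol⟩ := hok s (by simp)
    have hokt : pvOkList n m t := fun s hs => hok s (by simp [hs])
    rw [pv_seedDict_append] at h
    by_cases hrc : (i, j) = (r, c)
    · obtain ⟨rfl, rfl⟩ : i = r ∧ j = c := ⟨congrArg Prod.fst hrc, congrArg Prod.snd hrc⟩
      rw [PySem.Dict.get?_insert_self] at h
      exact ⟨[i, j, col], by simp, rfl, rfl, by cases h; rfl⟩
    · rw [PySem.Dict.get?_insert_of_ne _ _ hrc] at h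
      obtain ⟨s', hs', h1, h2, h3⟩ := ih hokt h
      exact ⟨s', by simp [hs'], h1, h2, h3⟩

-- ---------- the value painted by a processed prefix of the queue ----------

-- the colour a cell (i, j) has received from the already-processed queue entries p
-- (0 = none yet); the first adjacent entry painted it, which by the descending queue
-- order is the maximal adjacent colour
def pvNewVal (p : List (List Int)) (i j : Int) : Int :=
  ((p.filter (fun e => pvDd e i j == 1)).map pvClr).max?.getD 0

theorem pv_max_concat (l : List Int) (a : Int) :
    (l ++ [a]).max? = some (match l.max? with | none => a | some v => max v a) := by
  induction l with
  | nil => simp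
  | cons x t ih =>
    cases h : t.max? with
    | none =>
      rw [List.max?_eq_none_iff] at h
      subst h; simp
    | some v =>
      rw [List.cons_append, List.max?_cons', List.max?_cons'] at *
      cases h2 : (t ++ [a]).max? with
      | none => simp at h2
      | some w => simp_all

theorem pv_newval_ub {p : List (List Int)} {i j : Int} {e : List Int}
    (he : e ∈ p) (hadj : pvDd e i j = 1) : pvClr e ≤ pvNewVal p i j := by
  have hmem : pvClr e ∈ (p.filter (fun e => pvDd e i j == 1)).map pvClr :=
    List.mem_map.mpr ⟨e, List.mem_filter.mpr ⟨he, by simpa using hadj⟩, rfl⟩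
  cases hmax : ((p.filter (fun e => pvDd e i j == 1)).map pvClr).max? with
  | none => rw [List.max?_eq_none_iff] at hmax; rw [hmax] at hmem; simp at hmem
  | some v =>
    rw [pvNewVal, hmax, Option.getD_some]
    exact (List.max?_eq_some_iff.mp hmax).2 _ hmem

theorem pv_newval_attained {p : List (List Int)} {i j : Int}
    (h : pvNewVal p i j ≠ 0) :
    ∃ e ∈ p, pvDd e i j = 1 ∧ pvClr e = pvNewVal p i j := by
  cases hmax : ((p.filter (fun e => pvDd e i j == 1)).map pvClr).max? with
  | none => rw [pvNewVal, hmax] at h; simp at h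
  | some v =>
    obtain ⟨e, he, hclr⟩ := List.mem_map.mp (List.max?_mem hmax)
    have hef := List.mem_filter.mp he
    exact ⟨e, hef.1, by simpa using hef.2, by rw [pvNewVal, hmax, Option.getD_some, hclr]⟩

theorem pv_newval_zero_iff {p : List (List Int)} {i j : Int}
    (hcols : ∀ e ∈ p, pvClr e ≠ 0) :
    pvNewVal p i j = 0 ↔ ∀ e ∈ p, pvDd e i j ≠ 1 := by
  constructor
  · intro h e he hadj
    have hmem : pvClr e ∈ (p.filter (fun e' => pvDd e' i j == 1)).map pvClr :=
      List.mem_map.mpr ⟨e, List.mem_filter.mpr ⟨he, by simpa using hadj⟩, rfl⟩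
    cases hmax : ((p.filter (fun e' => pvDd e' i j == 1)).map pvClr).max? with
    | none => rw [List.max?_eq_none_iff] at hmax; rw [hmax] at hmem; simp at hmem
    | some v =>
      obtain ⟨e', he', hclr⟩ := List.mem_map.mp (List.max?_mem hmax)
      have hv : v = 0 := by rw [pvNewVal, hmax, Option.getD_some] at h; exact h
      exact hcols e' (List.mem_filter.mp he').1 (hclr.trans hv)
  · intro h
    have hnil : p.filter (fun e => pvDd e i j == 1) = [] := by
      rw [List.filter_eq_nil_iff]
      intro e he; simpa using h e he
    rw [pvNewVal, hnil]; rfl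

theorem pv_newval_append {p : List (List Int)} {e : List Int} {i j : Int}
    (hcols : ∀ e' ∈ p, pvClr e' ≠ 0) (hle : ∀ e' ∈ p, pvClr e ≤ pvClr e') :
    pvNewVal (p ++ [e]) i j =
      if pvDd e i j = 1 ∧ pvNewVal p i j = 0 then pvClr e else pvNewVal p i j := by
  by_cases hadj : pvDd e i j = 1
  · have h1 : pvNewVal (p ++ [e]) i j
        = (((p.filter (fun e' => pvDd e' i j == 1)).map pvClr) ++ [pvClr e]).max?.getD 0 := by
      rw [pvNewVal, List.filter_append,
        show List.filter (fun e' => pvDd e' i j == 1) [e] = [e] by simp [hadj],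
        List.map_append, List.map_singleton]
    rw [h1, pv_max_concat]
    cases hmax : ((p.filter (fun e' => pvDd e' i j == 1)).map pvClr).max? with
    | none =>
      have hp0 : pvNewVal p i j = 0 := by rw [pvNewVal, hmax]; rfl
      rw [if_pos ⟨hadj, hp0⟩]
      rfl
    | some v =>
      obtain ⟨e', he', hclr⟩ := List.mem_map.mp (List.max?_mem hmax)
      have hvp : pvNewVal p i j = v := by rw [pvNewVal, hmax]; rfl
      have hv0 : v ≠ 0 := hclr ▸ hcols e' (List.mem_filter.mp he').1
      have hlev : pvClr e ≤ v := hclr ▸ hle e' (List.mem_filter.mp he').1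
      rw [hvp, if_neg (fun hh => hv0 hh.2)]
      simp [max_eq_left hlev]
  · have h1 : pvNewVal (p ++ [e]) i j = pvNewVal p i j := by
      rw [pvNewVal, List.filter_append,
        show List.filter (fun e' => pvDd e' i j == 1) [e] = [] by simp [hadj],
        List.append_nil]
      rfl
    rw [h1, if_neg (fun hh => hadj hh.1)]

-- ---------- one queue entry: painting the four neighbours ----------

-- A's coloring attempt as a named step function (defeq to the lambda in pvLevelStep)
def pvStepA (color : Int) (st : List (List Int) × List (List Int)) (q : Int × Int) :
    List (List Int) × List (List Int) :=
  if (pvColorCell q.1 q.2 color st.1).1 then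
    ((pvColorCell q.1 q.2 color st.1).2, st.2 ++ [[q.1, q.2, color]])
  else ((pvColorCell q.1 q.2 color st.1).2, st.2)

-- the four neighbour cells, in the order A tries them
def pvNbrs (r c : Int) : List (Int × Int) := [(r, c + 1), (r, c - 1), (r + 1, c), (r - 1, c)]

theorem pv_dirs_to_nbrs (r c col : Int) (st : List (List Int) × List (List Int)) :
    pvDirs.foldl (fun st d => pvStepA col st (r + d.1, c + d.2)) st
      = (pvNbrs r c).foldl (pvStepA col) st := by
  simp only [pvDirs, pvNbrs, List.foldl_cons, List.foldl_nil, sub_eq_add_neg, add_zero]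

theorem pv_levelStep_eq (g : List (List Int)) (acc : List (List Int)) (r c col : Int) :
    pvLevelStep (g, acc) [r, c, col] = (pvNbrs r c).foldl (pvStepA col) (g, acc) := by
  have h1 : pvLevelStep (g, acc) [r, c, col]
      = pvDirs.foldl (fun st d => pvStepA col st (r + d.1, c + d.2)) (g, acc) := rfl
  rw [h1, pv_dirs_to_nbrs]

theorem pv_nbrs_mem (r c x y col : Int) : (x, y) ∈ pvNbrs r c ↔ pvDd [r, c, col] x y = 1 := by
  rw [pv_dd_triple]
  simp only [pvNbrs, List.mem_cons, List.not_mem_nil, or_false, Prod.mk.injEq]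
  rw [Int.abs_eq_natAbs, Int.abs_eq_natAbs]
  omega

theorem pv_nbrs_nodup (r c : Int) : (pvNbrs r c).Nodup := by
  simp [pvNbrs, Prod.ext_iff]
  omega

theorem pv_stepA_desc {n m : Int} (col : Int) {G : List (List Int)} (T : List (List Int))
    (x y : Int) (hd : pvDims n m G) :
    pvStepA col (G, T) (x, y) =
      if pvIn n m x y ∧ pvGetCell G x y = 0
      then (pvSeedCell G x y col, T ++ [[x, y, col]]) else (G, T) := by
  by_cases h : pvIn n m x y ∧ pvGetCell G x y = 0
  · have hc : pvColorCell x y col G = (true, pvSeedCell G x y col) := by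
      rw [pvColorCell, if_pos ((pv_cond_eq hd x y).mpr h)]
    simp [pvStepA, hc, if_pos h]
  · have hc : pvColorCell x y col G = (false, G) := by
      rw [pvColorCell, if_neg (fun hh => h ((pv_cond_eq hd x y).mp hh))]
    simp [pvStepA, hc, if_neg h]

-- painting an arbitrary (duplicate-free) list of candidate cells with one colour
theorem pv_paint_fold {n m : Int} (col : Int) (hcol : col ≠ 0) :
    ∀ (cands : List (Int × Int)), cands.Nodup →
    ∀ (G : List (List Int)) (T : List (List Int)) (F : Int → Int → Int),
      pvDims n m G → (∀ i j, pvIn n m i j → pvGetCell G i j = F i j) →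
      pvDims n m (cands.foldl (pvStepA col) (G, T)).1 ∧
      (∀ i j, pvIn n m i j → pvGetCell (cands.foldl (pvStepA col) (G, T)).1 i j =
        if (i, j) ∈ cands ∧ F i j = 0 then col else F i j) ∧
      (cands.foldl (pvStepA col) (G, T)).2 =
        T ++ (cands.filter (fun q => decide (pvIn n m q.1 q.2) && (F q.1 q.2 == 0))).map
              (fun q => [q.1, q.2, col]) ∧
      pvZeros (cands.foldl (pvStepA col) (G, T)).1 +
        (cands.filter (fun q => decide (pvIn n m q.1 q.2) && (F q.1 q.2 == 0))).length
          = pvZeros G := by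
  intro cands
  induction cands with
  | nil => intro _ G T F hd hF; exact ⟨hd, by simpa using hF, by simp, by simp⟩
  | cons q cs ih =>
    obtain ⟨x, y⟩ := q
    intro hnd G T F hd hF
    have hxy_cs : (x, y) ∉ cs := (List.nodup_cons.mp hnd).1
    have hnd' : cs.Nodup := (List.nodup_cons.mp hnd).2
    rw [List.foldl_cons, pv_stepA_desc col T x y hd]
    by_cases h : pvIn n m x y ∧ F x y = 0
    · rw [if_pos (by exact ⟨h.1, (hF x y h.1).trans h.2⟩)]
      have hd1 : pvDims n m (pvSeedCell G x y col) := pv_seedCell_dims hd x y col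
      have hF1 : ∀ i j, pvIn n m i j → pvGetCell (pvSeedCell G x y col) i j =
          (fun i j => if i = x ∧ j = y then col else F i j) i j := by
        intro i j hij
        rw [pv_get_seedCell hd h.1 col hij]
        by_cases he : i = x ∧ j = y
        · simp [he]
        · simp only [if_neg he]; exact hF i j hij
      obtain ⟨ihd, ihv, iht, ihz⟩ := ih hnd' (pvSeedCell G x y col) (T ++ [[x, y, col]]) _ hd1 hF1
      have hfc : List.filter (fun q => decide (pvIn n m q.1 q.2) &&
            ((if q.1 = x ∧ q.2 = y then col else F q.1 q.2) == 0)) cs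
          = List.filter (fun q => decide (pvIn n m q.1 q.2) && (F q.1 q.2 == 0)) cs := by
        apply List.filter_congr
        intro q hq
        have hne : ¬(q.1 = x ∧ q.2 = y) := by
          rintro ⟨h1, h2⟩
          exact hxy_cs (by rwa [show (x, y) = q by rw [← h1, ← h2]])
        rw [if_neg hne]
      refine ⟨ihd, ?_, ?_, ?_⟩
      · intro i j hij
        rw [ihv i j hij]
        by_cases he : (i, j) = (x, y)
        · obtain ⟨rfl, rfl⟩ : i = x ∧ j = y := ⟨congrArg Prod.fst he, congrArg Prod.snd he⟩
          simp [hxy_cs, h.2, hcol]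
        · have hne : ¬(i = x ∧ j = y) := fun hh => he (by rw [hh.1, hh.2])
          simp only [if_neg hne]
          by_cases hmem : (i, j) ∈ cs
          · simp [hmem, List.mem_cons]
          · simp [hmem, List.mem_cons, he]
      · rw [iht, hfc]
        rw [List.filter_cons_of_pos (by simp [h.1, h.2]), List.map_cons]
        simp
      · rw [hfc] at ihz
        have hz := pv_seedCell_zeros hd h.1.1 h.1.2.1 h.1.2.2.1 h.1.2.2.2
          ((hF x y h.1).trans h.2) hcol
        rw [List.filter_cons_of_pos (by simp [h.1, h.2]), List.length_cons]
        omega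
    · have hcond : ¬(pvIn n m x y ∧ pvGetCell G x y = 0) := by
        rintro ⟨h1, h2⟩
        exact h ⟨h1, (hF x y h1).symm.trans h2⟩
      rw [if_neg hcond]
      obtain ⟨ihd, ihv, iht, ihz⟩ := ih hnd' G T F hd hF
      have hfc : List.filter (fun q => decide (pvIn n m q.1 q.2) && (F q.1 q.2 == 0)) ((x, y) :: cs)
          = List.filter (fun q => decide (pvIn n m q.1 q.2) && (F q.1 q.2 == 0)) cs := by
        rw [List.filter_cons_of_neg]
        simp only [Bool.and_eq_true, decide_eq_true_eq, beq_iff_eq]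
        rintro ⟨h1, h2⟩; exact h ⟨h1, h2⟩
      refine ⟨ihd, ?_, by rw [iht, hfc], by rw [hfc]; exact ihz⟩
      intro i j hij
      rw [ihv i j hij]
      by_cases he : (i, j) = (x, y)
      · obtain ⟨rfl, rfl⟩ : i = x ∧ j = y := ⟨congrArg Prod.fst he, congrArg Prod.snd he⟩
        have hF0 : ¬ F i j = 0 := fun hz => h ⟨hij, hz⟩
        simp [hF0]
      · by_cases hmem : (i, j) ∈ cs
        · simp [hmem, List.mem_cons]
        · simp [hmem, List.mem_cons, he]

-- ---------- the wave invariants ----------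

-- canonical cell value after wave k: seeds stay; a non-seed cell at minimal source
-- distance d carries, once reached (d ≤ k), the largest colour among the distance-d sources
def pvVal (ss : List (List Int)) (k : Int) (i j : Int) : Int :=
  match (pvSeedDict ss).get? (i, j) with
  | some v => v
  | none =>
    match pvMind ss i j with
    | none => 0
    | some d => if d ≤ k then pvMx ss i j d else 0

def pvEntryOK (n m : Int) (ss : List (List Int)) (k : Int) (e : List Int) : Prop :=
  ∃ r c col, e = [r, c, col] ∧ pvIn n m r c ∧ col ≠ 0 ∧ pvMind ss r c = some k ∧
    ∃ s ∈ ss, pvDd s r c = k ∧ pvClr s = col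

def pvGInv (n m : Int) (ss : List (List Int)) (k : Int) (g : List (List Int)) : Prop :=
  pvDims n m g ∧ ∀ i j, pvIn n m i j → pvGetCell g i j = pvVal ss k i j

def pvQInv (n m : Int) (ss : List (List Int)) (k : Int) (q : List (List Int)) : Prop :=
  (∀ e ∈ q, pvEntryOK n m ss k e) ∧
  q.Pairwise (fun a b => pvClr b ≤ pvClr a) ∧
  (∀ i j, pvIn n m i j → pvMind ss i j = some k →
    ∃ e ∈ q, pvRow e = i ∧ pvCol e = j ∧ pvClr e = pvMx ss i j k)

-- the grid-value function carried through one wave: the pre-wave grid overlaid with what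
-- the processed prefix p has painted
def pvF (g : List (List Int)) (p : List (List Int)) (i j : Int) : Int :=
  if pvGetCell g i j ≠ 0 then pvGetCell g i j else pvNewVal p i j

theorem pv_entry_clr_ne {n m : Int} {ss : List (List Int)} {k : Int} {e : List Int}
    (h : pvEntryOK n m ss k e) : pvClr e ≠ 0 := by
  obtain ⟨r, c, col, rfl, _, hcol, _⟩ := h
  exact hcol

theorem pv_block_pairwise (col : Int) (l : List (Int × Int)) :
    (l.map (fun q => [q.1, q.2, col])).Pairwise (fun a b => pvClr b ≤ pvClr a) := by
  induction l with
  | nil => simp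
  | cons q t ih =>
    rw [List.map_cons, List.pairwise_cons]
    refine ⟨?_, ih⟩
    intro a ha
    obtain ⟨q', hq', rfl⟩ := List.mem_map.mp ha
    exact le_of_eq rfl

-- processing the remaining entries `rest` of the wave queue, with prefix p already done
theorem pv_inner {n m : Int} {ss : List (List Int)} {k : Int} {g : List (List Int)} :
    ∀ (rest p : List (List Int)) (G T : List (List Int)),
      (∀ e ∈ p ++ rest, pvEntryOK n m ss k e) →
      (p ++ rest).Pairwise (fun a b => pvClr b ≤ pvClr a) →
      pvDims n m G →
      (∀ i j, pvIn n m i j → pvGetCell G i j = pvF g p i j) →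
      (∀ e' ∈ T, ∃ i j, e' = [i, j, pvNewVal p i j] ∧ pvIn n m i j ∧
          pvGetCell g i j = 0 ∧ pvNewVal p i j ≠ 0) →
      (∀ i j, pvIn n m i j → pvGetCell g i j = 0 → pvNewVal p i j ≠ 0 →
          ∃ e' ∈ T, pvRow e' = i ∧ pvCol e' = j) →
      T.Pairwise (fun a b => pvClr b ≤ pvClr a) →
      (∀ e' ∈ T, ∃ e ∈ p, pvClr e' = pvClr e) →
      pvZeros G + T.length = pvZeros g →
      pvDims n m (rest.foldl pvLevelStep (G, T)).1 ∧
      (∀ i j, pvIn n m i j → pvGetCell (rest.foldl pvLevelStep (G, T)).1 i j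
          = pvF g (p ++ rest) i j) ∧
      (∀ e' ∈ (rest.foldl pvLevelStep (G, T)).2, ∃ i j,
          e' = [i, j, pvNewVal (p ++ rest) i j] ∧ pvIn n m i j ∧
          pvGetCell g i j = 0 ∧ pvNewVal (p ++ rest) i j ≠ 0) ∧
      (∀ i j, pvIn n m i j → pvGetCell g i j = 0 → pvNewVal (p ++ rest) i j ≠ 0 →
          ∃ e' ∈ (rest.foldl pvLevelStep (G, T)).2, pvRow e' = i ∧ pvCol e' = j) ∧
      (rest.foldl pvLevelStep (G, T)).2.Pairwise (fun a b => pvClr b ≤ pvClr a) ∧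
      (∀ e' ∈ (rest.foldl pvLevelStep (G, T)).2, ∃ e ∈ p ++ rest, pvClr e' = pvClr e) ∧
      pvZeros (rest.foldl pvLevelStep (G, T)).1 + (rest.foldl pvLevelStep (G, T)).2.length
        = pvZeros g := by
  intro rest
  induction rest with
  | nil =>
    intro p G T hok hpw hd hF h1 h2 h3 h4 hz
    rw [List.foldl_nil, List.append_nil]
    exact ⟨hd, hF, h1, h2, h3, h4, hz⟩
  | cons e rest' ih =>
    intro p G T hok hpw hd hF h1 h2 h3 h4 hz
    obtain ⟨r, c, col, rfl, hin, hcol, hmind, hwit⟩ := hok e (by simp)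
    have hple : ∀ e' ∈ p, col ≤ pvClr e' := by
      intro e' he'
      have := (List.pairwise_append.mp hpw).2.2 e' he' [r, c, col] (by simp)
      simpa [pvClr] using this
    have hpcols : ∀ e' ∈ p, pvClr e' ≠ 0 := fun e' he' =>
      pv_entry_clr_ne (hok e' (by simp [he']))
    have hple' : ∀ e' ∈ p, pvClr [r, c, col] ≤ pvClr e' := hple
    simp only [List.foldl_cons, pv_levelStep_eq]
    obtain ⟨pd, pval, pt, pz⟩ := pv_paint_fold (n := n) (m := m) col hcol (pvNbrs r c)
      (pv_nbrs_nodup r c) G T (pvF g p) hd hF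
    have hnv : ∀ i j, pvNewVal (p ++ [[r, c, col]]) i j
        = if pvDd [r, c, col] i j = 1 ∧ pvNewVal p i j = 0 then col else pvNewVal p i j := by
      intro i j
      rw [pv_newval_append hpcols hple']; rfl
    have hF' : ∀ i j, pvIn n m i j →
        pvGetCell ((pvNbrs r c).foldl (pvStepA col) (G, T)).1 i j
          = pvF g (p ++ [[r, c, col]]) i j := by
      intro i j hij
      rw [pval i j hij]
      by_cases hg : pvGetCell g i j = 0
      · have hFp : pvF g p i j = pvNewVal p i j := by unfold pvF; simp [hg]
        have hFpe : pvF g (p ++ [[r, c, col]]) i j = pvNewVal (p ++ [[r, c, col]]) i j := by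
          unfold pvF; simp [hg]
        rw [hFpe, hnv i j, hFp]
        by_cases hc1 : pvDd [r, c, col] i j = 1
        · by_cases hc2 : pvNewVal p i j = 0
          · rw [if_pos ⟨(pv_nbrs_mem r c i j col).mpr hc1, hc2⟩, if_pos ⟨hc1, hc2⟩]
          · rw [if_neg (fun hh => hc2 hh.2), if_neg (fun hh => hc2 hh.2)]
        · rw [if_neg (fun hh => hc1 ((pv_nbrs_mem r c i j col).mp hh.1)),
            if_neg (fun hh => hc1 hh.1)]
      · have hFp : pvF g p i j = pvGetCell g i j := by unfold pvF; simp [hg]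
        have hFpe : pvF g (p ++ [[r, c, col]]) i j = pvGetCell g i j := by
          unfold pvF; simp [hg]
        rw [hFpe, if_neg (fun hh => hg (hFp ▸ hh.2))]
        exact hFp
    have hT1' : ∀ e' ∈ ((pvNbrs r c).foldl (pvStepA col) (G, T)).2, ∃ i j,
        e' = [i, j, pvNewVal (p ++ [[r, c, col]]) i j] ∧ pvIn n m i j ∧
        pvGetCell g i j = 0 ∧ pvNewVal (p ++ [[r, c, col]]) i j ≠ 0 := by
      intro e' he'
      rw [pt] at he'
      rcases List.mem_append.mp he' with hold | hnew
      · obtain ⟨i, j, rfl, hij, hg, hnz⟩ := h1 e' hold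
        refine ⟨i, j, ?_, hij, hg, ?_⟩
        · rw [hnv i j, if_neg (fun hh => hnz hh.2)]
        · rw [hnv i j, if_neg (fun hh => hnz hh.2)]; exact hnz
      · obtain ⟨⟨x, y⟩, hxy, rfl⟩ := List.mem_map.mp hnew
        have hxf := List.mem_filter.mp hxy
        have hxin : pvIn n m x y := by
          have := hxf.2
          simp only [Bool.and_eq_true, decide_eq_true_eq] at this
          exact this.1
        have hx0 : pvF g p x y = 0 := by
          have := hxf.2
          simp only [Bool.and_eq_true, beq_iff_eq] at this
          exact this.2
        have hgx : pvGetCell g x y = 0 := by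
          by_contra hgx
          unfold pvF at hx0; rw [if_pos hgx] at hx0; exact hgx hx0
        have hnvx : pvNewVal p x y = 0 := by
          unfold pvF at hx0; rw [if_neg (by simp [hgx])] at hx0; exact hx0
        have hadj : pvDd [r, c, col] x y = 1 := (pv_nbrs_mem r c x y col).mp hxf.1
        refine ⟨x, y, ?_, hxin, hgx, ?_⟩
        · rw [hnv x y, if_pos ⟨hadj, hnvx⟩]
        · rw [hnv x y, if_pos ⟨hadj, hnvx⟩]; exact hcol
    have hT2' : ∀ i j, pvIn n m i j → pvGetCell g i j = 0 →
        pvNewVal (p ++ [[r, c, col]]) i j ≠ 0 →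
        ∃ e' ∈ ((pvNbrs r c).foldl (pvStepA col) (G, T)).2, pvRow e' = i ∧ pvCol e' = j := by
      intro i j hij hg hnz
      rw [pt]
      by_cases hp : pvNewVal p i j = 0
      · rw [hnv i j] at hnz
        by_cases hadj : pvDd [r, c, col] i j = 1 ∧ pvNewVal p i j = 0
        · refine ⟨[i, j, col], List.mem_append.mpr (Or.inr ?_), rfl, rfl⟩
          refine List.mem_map.mpr ⟨(i, j), ?_, rfl⟩
          refine List.mem_filter.mpr ⟨(pv_nbrs_mem r c i j col).mpr hadj.1, ?_⟩
          have hF0 : pvF g p i j = 0 := by unfold pvF; simp [hg, hp]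
          simp [hij, hF0]
        · rw [if_neg hadj] at hnz; exact absurd hp hnz
      · obtain ⟨e', he', hr, hc⟩ := h2 i j hij hg hp
        exact ⟨e', List.mem_append.mpr (Or.inl he'), hr, hc⟩
    have hT3' : ((pvNbrs r c).foldl (pvStepA col) (G, T)).2.Pairwise
        (fun a b => pvClr b ≤ pvClr a) := by
      rw [pt, List.pairwise_append]
      refine ⟨h3, pv_block_pairwise col _, ?_⟩
      intro a ha b hb
      obtain ⟨e0, he0, hclr0⟩ := h4 a ha
      obtain ⟨q0, hq0, rfl⟩ := List.mem_map.mp hb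
      show pvClr [q0.1, q0.2, col] ≤ pvClr a
      rw [hclr0]
      simpa [pvClr] using hple e0 he0
    have hT4' : ∀ e' ∈ ((pvNbrs r c).foldl (pvStepA col) (G, T)).2,
        ∃ e ∈ p ++ [[r, c, col]], pvClr e' = pvClr e := by
      intro e' he'
      rw [pt] at he'
      rcases List.mem_append.mp he' with hold | hnew
      · obtain ⟨e0, he0, hclr0⟩ := h4 e' hold
        exact ⟨e0, by simp [he0], hclr0⟩
      · obtain ⟨q0, hq0, rfl⟩ := List.mem_map.mp hnew
        exact ⟨[r, c, col], by simp, by simp [pvClr]⟩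
    have hZ' : pvZeros ((pvNbrs r c).foldl (pvStepA col) (G, T)).1 +
        ((pvNbrs r c).foldl (pvStepA col) (G, T)).2.length = pvZeros g := by
      rw [pt, List.length_append, List.length_map]
      omega
    have hassoc : (p ++ [[r, c, col]]) ++ rest' = p ++ [r, c, col] :: rest' := by simp
    obtain ⟨qd, qval, q1, q2, q3, q4, qz⟩ := ih (p ++ [[r, c, col]])
      ((pvNbrs r c).foldl (pvStepA col) (G, T)).1
      ((pvNbrs r c).foldl (pvStepA col) (G, T)).2
      (by rw [hassoc]; exact hok) (by rw [hassoc]; exact hpw) pd hF'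
      hT1' hT2' hT3' hT4' hZ'
    rw [hassoc] at qval q1 q2 q4
    exact ⟨qd, qval, q1, q2, q3, q4, qz⟩

-- ---------- one whole wave ----------

theorem pv_adj_entry {n m : Int} {ss : List (List Int)} {k : Int} {e : List Int}
    (he : pvEntryOK n m ss k e) {i j : Int} (hadj : pvDd e i j = 1) :
    ∃ s ∈ ss, pvDd s i j ≤ k + 1 ∧ pvClr s = pvClr e := by
  obtain ⟨r, c, col, rfl, hin, hcol, hmind, s, hs, hds, hclr⟩ := he
  refine ⟨s, hs, ?_, by rw [hclr]; rfl⟩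
  have htri := pv_dd_triangle s i j r c
  have : |i - r| + |j - c| = 1 := by
    rw [pv_dd_triple] at hadj
    rw [abs_sub_comm i r, abs_sub_comm j c]
    exact hadj
  omega

theorem pv_q_colors {n m : Int} {ss : List (List Int)} {k : Int} {q : List (List Int)}
    (hq : ∀ e ∈ q, pvEntryOK n m ss k e) : ∀ e ∈ q, pvClr e ≠ 0 :=
  fun e he => pv_entry_clr_ne (hq e he)

theorem pv_q_nil_of_ss_nil {n m : Int} {ss : List (List Int)} {k : Int} {q : List (List Int)}
    (hq : ∀ e ∈ q, pvEntryOK n m ss k e) (hss : ss = []) : q = [] := by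
  cases q with
  | nil => rfl
  | cons a t =>
    obtain ⟨r, c, col, _, _, _, _, s, hs, _⟩ := hq a List.mem_cons_self
    rw [hss] at hs; simp at hs

-- on the (k+1)-front, the painted value is exactly the largest colour among the
-- distance-(k+1) sources
theorem pv_front_val {n m : Int} {ss : List (List Int)} {k : Int} {q : List (List Int)}
    (hok : pvOkList n m ss) (hk : 0 ≤ k) (hQ : pvQInv n m ss k q)
    {i j : Int} (hij : pvIn n m i j) (hmind : pvMind ss i j = some (k + 1)) :
    pvNewVal q i j = pvMx ss i j (k + 1) ∧ pvNewVal q i j ≠ 0 := by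
  obtain ⟨hmem, hlow⟩ := pv_mind_some_iff.mp hmind
  -- the maximal-colour source on the front, and a neighbour one step toward it
  obtain ⟨sM, hsM, hdM, hclrM⟩ := pv_mx_attained hmem
  obtain ⟨rM, cM, colM, rfl, hinM, hcolM⟩ := hok sM hsM
  obtain ⟨i', j', hin', hstep, hd'⟩ := pv_toward hinM hij hdM (by omega)
  have hmind' : pvMind ss i' j' = some k := by
    rw [pv_mind_some_iff]
    refine ⟨⟨[rM, cM, colM], hsM, by omega⟩, ?_⟩
    intro s hs
    have ht := pv_dd_triangle s i j i' j'
    have := hlow s hs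
    omega
  obtain ⟨e, he, her, hec, heclr⟩ := hQ.2.2 i' j' hin' hmind'
  have headj : pvDd e i j = 1 := by
    unfold pvDd
    rw [her, hec, abs_sub_comm i' i, abs_sub_comm j' j]
    exact hstep
  have hq1 := hQ.1
  have hcols := pv_q_colors hq1
  -- lower bound: that neighbour's entry colour
  have hlb : pvMx ss i j (k + 1) ≤ pvNewVal q i j := by
    have h1 : pvClr e ≤ pvNewVal q i j := pv_newval_ub he headj
    have h2 : pvClr [rM, cM, colM] ≤ pvMx ss i' j' k :=
      pv_mx_ub hsM (by omega)
    rw [heclr] at h1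
    rw [hclrM] at h2
    omega
  have hnz : pvNewVal q i j ≠ 0 := by
    intro h0
    exact ((pv_newval_zero_iff hcols).mp h0) e he headj
  -- upper bound: any painted colour comes from a source on the front
  obtain ⟨e0, he0, hadj0, hclr0⟩ := pv_newval_attained hnz
  obtain ⟨s0, hs0, hds0, hclrs0⟩ := pv_adj_entry (hq1 e0 he0) hadj0
  have hd0 : pvDd s0 i j = k + 1 := le_antisymm hds0 (hlow s0 hs0)
  have hub : pvNewVal q i j ≤ pvMx ss i j (k + 1) := by
    have := pv_mx_ub hs0 hd0
    omega
  exact ⟨le_antisymm hub hlb, hnz⟩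

theorem pv_wave {n m : Int} {ss : List (List Int)} {k : Int} {g q : List (List Int)}
    (hok : pvOkList n m ss) (hk : 0 ≤ k) (hG : pvGInv n m ss k g) (hQ : pvQInv n m ss k q) :
    pvGInv n m ss (k + 1) (pvLevel g q).1 ∧ pvQInv n m ss (k + 1) (pvLevel g q).2 ∧
      pvZeros (pvLevel g q).1 + (pvLevel g q).2.length = pvZeros g := by
  have hF0 : ∀ i j, pvIn n m i j → pvGetCell g i j = pvF g [] i j := by
    intro i j hij
    unfold pvF
    by_cases hgz : pvGetCell g i j = 0
    · rw [if_neg (by simp [hgz])]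
      rw [hgz]; rfl
    · rw [if_pos hgz]
  obtain ⟨qd, qval, q1, q2, q3, q4, qz⟩ := pv_inner (n := n) (m := m) (ss := ss) (k := k)
    (g := g) q [] g []
    (by simpa using hQ.1) (by simpa using hQ.2.1) hG.1 hF0
    (by intro e' he'; simp at he') (by intro i j _ _ h; exact absurd rfl h)
    List.Pairwise.nil (by intro e' he'; simp at he') (by simp)
  simp only [List.nil_append] at qval q1 q2 q4
  have hlevel : pvLevel g q = (q.foldl pvLevelStep (g, [])) := rfl
  rw [hlevel]
  -- a seeded value is a source colour, hence non-zero
  have hseedne : ∀ i j v, (pvSeedDict ss).get? (i, j) = some v → v ≠ 0 := by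
    intro i j v hv
    obtain ⟨s, hs, _, _, hclr⟩ := pv_seedDict_some hok hv
    obtain ⟨r, c, col, rfl, _, hcol⟩ := hok s hs
    rw [← hclr]; exact hcol
  -- the value a far cell cannot have received
  have hfar : ∀ i j d, pvMind ss i j = some d → k + 1 < d → pvNewVal q i j = 0 := by
    intro i j d hmd hdk
    rw [pv_newval_zero_iff (pv_q_colors hQ.1)]
    intro e he hadj
    obtain ⟨s, hs, hds, _⟩ := pv_adj_entry (hQ.1 e he) hadj
    have := (pv_mind_some_iff.mp hmd).2 s hs
    omega
  refine ⟨⟨qd, ?_⟩, ⟨?_, q3, ?_⟩, qz⟩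
  · -- grid invariant at k + 1
    intro i j hij
    rw [qval i j hij]
    have hgv := hG.2 i j hij
    unfold pvF
    cases hsd : (pvSeedDict ss).get? (i, j) with
    | some v =>
      have hgv' : pvGetCell g i j = v := by rw [hgv]; simp only [pvVal, hsd]
      rw [if_pos (by rw [hgv']; exact hseedne i j v hsd), hgv']
      simp only [pvVal, hsd]
    | none =>
      cases hmd : pvMind ss i j with
      | none =>
        have hss := pv_mind_none_iff.mp hmd
        have hqnil := pv_q_nil_of_ss_nil hQ.1 hss
        have hgv' : pvGetCell g i j = 0 := by rw [hgv]; simp only [pvVal, hsd, hmd]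
        rw [if_neg (by simp [hgv']), hqnil]
        simp only [pvVal, hsd, hmd]
        rfl
      | some d =>
        have hgv' : pvGetCell g i j = if d ≤ k then pvMx ss i j d else 0 := by
          rw [hgv]; simp only [pvVal, hsd, hmd]
        by_cases hdk : d ≤ k
        · have hmx := pv_mx_ne_zero hok (pv_mind_some_iff.mp hmd).1
          rw [if_pos (by rw [hgv', if_pos hdk]; exact hmx), hgv', if_pos hdk]
          simp only [pvVal, hsd, hmd]
          rw [if_pos (by omega)]
        · have hg0 : pvGetCell g i j = 0 := by rw [hgv', if_neg hdk]
          rw [if_neg (by simp [hg0])]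
          by_cases hdk1 : d = k + 1
          · subst hdk1
            obtain ⟨hval, _⟩ := pv_front_val hok hk hQ hij hmd
            rw [hval]
            simp only [pvVal, hsd, hmd]
            rw [if_pos (by omega)]
          · rw [hfar i j d hmd (by omega)]
            simp only [pvVal, hsd, hmd]
            rw [if_neg (by omega)]
  · -- queue entries are well-formed at k + 1
    intro e' he'
    obtain ⟨i, j, rfl, hij, hg0, hnz⟩ := q1 e' he'
    have hgv := hG.2 i j hij
    cases hsd : (pvSeedDict ss).get? (i, j) with
    | some v =>
      have : pvGetCell g i j = v := by rw [hgv]; simp only [pvVal, hsd]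
      exact absurd (this ▸ hg0) (hseedne i j v hsd)
    | none =>
      cases hmd : pvMind ss i j with
      | none =>
        have hqnil := pv_q_nil_of_ss_nil hQ.1 (pv_mind_none_iff.mp hmd)
        rw [hqnil] at hnz
        exact absurd rfl hnz
      | some d =>
        have hgv' : pvGetCell g i j = if d ≤ k then pvMx ss i j d else 0 := by
          rw [hgv]; simp only [pvVal, hsd, hmd]
        have hdk : ¬ d ≤ k := by
          intro hdk
          rw [hgv', if_pos hdk] at hg0
          exact pv_mx_ne_zero hok (pv_mind_some_iff.mp hmd).1 hg0
        have hdk1 : d = k + 1 := by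
          by_contra hne
          exact hnz (hfar i j d hmd (by omega))
        subst hdk1
        obtain ⟨hval, _⟩ := pv_front_val hok hk hQ hij hmd
        obtain ⟨s, hs, hds, hclrs⟩ := pv_mx_attained (pv_mind_some_iff.mp hmd).1
        exact ⟨i, j, pvNewVal q i j, rfl, hij, hnz, hmd, s, hs, hds, by rw [hclrs, hval]⟩
  · -- completeness at k + 1
    intro i j hij hmd
    cases hsd : (pvSeedDict ss).get? (i, j) with
    | some v =>
      obtain ⟨s, hs, hrow, hcol', _⟩ := pv_seedDict_some hok hsd
      obtain ⟨r, c, col, rfl, _, _⟩ := hok s hs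
      have hr : r = i := hrow
      have hc : c = j := hcol'
      have hd0 : pvDd [r, c, col] i j = 0 := pv_dd_zero.mpr ⟨hr, hc⟩
      have := (pv_mind_some_iff.mp hmd).2 _ hs
      omega
    | none =>
      have hg0 : pvGetCell g i j = 0 := by
        rw [hG.2 i j hij]; simp only [pvVal, hsd, hmd]
        rw [if_neg (by omega)]
      obtain ⟨hval, hnz⟩ := pv_front_val hok hk hQ hij hmd
      obtain ⟨e', he', hrow, hcol'⟩ := q2 i j hij hg0 hnz
      obtain ⟨i0, j0, rfl, _, _, _⟩ := q1 e' he'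
      have hi0 : i0 = i := hrow
      have hj0 : j0 = j := hcol'
      refine ⟨[i0, j0, pvNewVal q i0 j0], he', hi0, hj0, ?_⟩
      show pvNewVal q i0 j0 = pvMx ss i j (k + 1)
      rw [hi0, hj0]
      exact hval

-- ---------- loop termination: the final grid ----------

-- final canonical value of a cell (every reachable cell painted)
def pvValF (ss : List (List Int)) (i j : Int) : Int :=
  match (pvSeedDict ss).get? (i, j) with
  | some v => v
  | none =>
    match pvMind ss i j with
    | none => 0
    | some d => pvMx ss i j d

theorem pv_loopA_nil (f : Nat) (g : List (List Int)) : pvLoopA f g [] = g := by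
  cases f <;> simp [pvLoopA]

-- an empty queue at level k leaves no cell at distance ≥ k
theorem pv_empty_no_far {n m : Int} {ss : List (List Int)} {k : Int}
    (hok : pvOkList n m ss) (hk : 0 ≤ k) (hQ : pvQInv n m ss k []) :
    ∀ (t : Nat) (i j : Int), pvIn n m i j → pvMind ss i j = some (k + t) → False := by
  intro t
  induction t with
  | zero =>
    intro i j hij hmd
    obtain ⟨e, he, _⟩ := hQ.2.2 i j hij (by simpa using hmd)
    simp at he
  | succ t' ih =>
    intro i j hij hmd
    obtain ⟨hmem, hlow⟩ := pv_mind_some_iff.mp hmd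
    obtain ⟨s, hs, hds⟩ := hmem
    obtain ⟨r, c, col, rfl, hin, _⟩ := hok s hs
    obtain ⟨i', j', hin', hstep, hd'⟩ := pv_toward hin hij hds (by push_cast; omega)
    have hmind' : pvMind ss i' j' = some (k + t') := by
      rw [pv_mind_some_iff]
      refine ⟨⟨[r, c, col], hs, by push_cast at hd' ⊢; omega⟩, ?_⟩
      intro s' hs'
      have ht := pv_dd_triangle s' i j i' j'
      have := hlow s' hs'
      push_cast at *
      omega
    exact ih i' j' hin' hmind'

theorem pv_final_val {n m : Int} {ss : List (List Int)} {k : Int} {g : List (List Int)}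
    (hok : pvOkList n m ss) (hk : 0 ≤ k) (hG : pvGInv n m ss k g) (hQ : pvQInv n m ss k [])
    {i j : Int} (hij : pvIn n m i j) : pvGetCell g i j = pvValF ss i j := by
  rw [hG.2 i j hij]
  unfold pvVal pvValF
  cases hsd : (pvSeedDict ss).get? (i, j) with
  | some v => rfl
  | none =>
    cases hmd : pvMind ss i j with
    | none => rfl
    | some d =>
      have hdk : d ≤ k := by
        by_contra hgt
        have hd0 : 0 ≤ d := pv_mind_nonneg hmd
        refine pv_empty_no_far hok hk hQ (d - k).toNat i j hij ?_
        rw [show k + ((d - k).toNat : Int) = d by omega]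
        exact hmd
      show (if d ≤ k then pvMx ss i j d else 0) = pvMx ss i j d
      rw [if_pos hdk]

-- A's while loop, by strong induction on the number of zero cells
theorem pv_loop {n m : Int} {ss : List (List Int)} (hok : pvOkList n m ss) :
    ∀ (z : Nat) (g q : List (List Int)) (k : Int) (f : Nat),
      pvZeros g = z → 0 ≤ k → pvGInv n m ss k g → pvQInv n m ss k q →
      pvZeros g + 2 ≤ f →
      pvDims n m (pvLoopA f g q) ∧
        ∀ i j, pvIn n m i j → pvGetCell (pvLoopA f g q) i j = pvValF ss i j := by
  intro z
  induction z using Nat.strong_induction_on with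
  | _ z IH =>
    intro g q k f hz hk hG hQ hf
    cases q with
    | nil =>
      rw [pv_loopA_nil]
      exact ⟨hG.1, fun i j hij => pv_final_val hok hk hG hQ hij⟩
    | cons e q' =>
      obtain ⟨f', rfl⟩ : ∃ f', f = f' + 1 := ⟨f - 1, by omega⟩
      rw [show pvLoopA (f' + 1) g (e :: q')
          = pvLoopA f' (pvLevel g (e :: q')).1 (pvLevel g (e :: q')).2 by
        rw [pvLoopA, if_neg (by simp)]]
      obtain ⟨hG', hQ', hz'⟩ := pv_wave hok hk hG hQ
      cases ht : (pvLevel g (e :: q')).2 with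
      | nil =>
        rw [pv_loopA_nil]
        rw [ht] at hQ'
        exact ⟨hG'.1, fun i j hij => pv_final_val hok (by omega) hG' hQ' hij⟩
      | cons t0 t' =>
        have hlt : pvZeros (pvLevel g (e :: q')).1 < pvZeros g := by
          rw [ht] at hz'; simp only [List.length_cons] at hz'; omega
        rw [← ht]
        exact IH (pvZeros (pvLevel g (e :: q')).1) (by omega)
          (pvLevel g (e :: q')).1 (pvLevel g (e :: q')).2 (k + 1) f'
          rfl (by omega) hG' hQ' (by omega)

-- the zero count is bounded by the grid area
theorem pv_zeros_le_aux (mN : Nat) :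
    ∀ g : List (List Int), (∀ row ∈ g, row.length = mN) → pvZeros g ≤ g.length * mN := by
  intro g
  induction g with
  | nil => intro _; simp [pvZeros]
  | cons row t ih =>
    intro hrows
    have h1 : row.count 0 ≤ mN := by
      rw [← hrows row List.mem_cons_self]; exact List.count_le_length
    have h2 := ih (fun r hr => hrows r (List.mem_cons_of_mem _ hr))
    simp only [pvZeros, List.map_cons, List.sum_cons, List.length_cons] at *
    calc row.count 0 + (t.map fun r => r.count 0).sum
        ≤ mN + t.length * mN := by omega
      _ = (t.length + 1) * mN := by ring

theorem pv_zeros_le {n m : Int} {g : List (List Int)} (hd : pvDims n m g) :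
    pvZeros g ≤ n.toNat * m.toNat := by
  obtain ⟨hl, hrows⟩ := hd
  rw [← hl]
  exact pv_zeros_le_aux m.toNat g hrows

-- ---------- the invariants hold initially, and A computes pvValF ----------

theorem pv_pairwise_key_clr :
    ∀ l : List (List Int), (∀ x ∈ l, pvKey x = pvClr x) →
      l.Pairwise (fun a b => pvKey b ≤ pvKey a) →
      l.Pairwise (fun a b => pvClr b ≤ pvClr a) := by
  intro l
  induction l with
  | nil => intro _ _; exact List.Pairwise.nil
  | cons x t ih =>
    intro hkeys hp
    rw [List.pairwise_cons] at hp ⊢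
    refine ⟨?_, ih (fun y hy => hkeys y (by simp [hy])) hp.2⟩
    intro b hb
    rw [← hkeys x (by simp), ← hkeys b (by simp [hb])]
    exact hp.1 b hb

theorem pv_ok_sorted {n m : Int} {sources : List (List Int)}
    (hpre : Pre_colorGrid n m sources) :
    pvOkList n m (PySem.List.sorted sources pvKey true) := by
  intro s hs
  have hx : s ∈ sources := (PySem.List.mem_sorted _ _ _ _).mp hs
  have hok : pvOkSrc n m s = true := List.all_eq_true.mp hpre s hx
  match s with
  | [] => simp [pvOkSrc] at hok
  | [_] => simp [pvOkSrc] at hok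
  | [_, _] => simp [pvOkSrc] at hok
  | [r, c, col] =>
    simp only [pvOkSrc, Bool.and_eq_true, decide_eq_true_eq, Bool.not_eq_true',
      beq_eq_false_iff_ne] at hok
    exact ⟨r, c, col, rfl, ⟨hok.1.1.1.1, hok.1.1.1.2, hok.1.1.2, hok.1.2⟩, hok.2⟩
  | _ :: _ :: _ :: _ :: _ => simp [pvOkSrc] at hok

theorem pv_G0 {n m : Int} {ss : List (List Int)} (hok : pvOkList n m ss) :
    pvGInv n m ss 0 (pvSeed (List.replicate n.toNat (List.replicate m.toNat 0)) ss) := by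
  refine ⟨pv_seed_dims ss _ (pv_g0_dims n m), ?_⟩
  intro i j hij
  rw [pv_seed_get hok (pv_g0_dims n m) hij, pv_g0_get n m hij]
  cases hsd : (pvSeedDict ss).get? (i, j) with
  | some v => simp only [pvVal, hsd]; rfl
  | none =>
    simp only [pvVal, hsd, Option.getD_none]
    cases hmd : pvMind ss i j with
    | none => rfl
    | some d =>
      have hd0 : 0 ≤ d := pv_mind_nonneg hmd
      have hdne : d ≠ 0 := by
        intro h0
        obtain ⟨s, hs, hds⟩ := (pv_mind_some_iff.mp hmd).1
        obtain ⟨r, c, col, rfl, _, _⟩ := hok s hs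
        obtain ⟨hr, hc⟩ := pv_dd_zero.mp (h0 ▸ hds)
        exact (pv_seedDict_none_iff hok).mp hsd [r, c, col] hs ⟨hr, hc⟩
      show (0 : Int) = if d ≤ 0 then pvMx ss i j d else 0
      rw [if_neg (by omega)]

theorem pv_Q0 {n m : Int} {ss : List (List Int)} (hok : pvOkList n m ss)
    (hsort : ss.Pairwise (fun a b => pvKey b ≤ pvKey a)) :
    pvQInv n m ss 0 ss := by
  refine ⟨?_, ?_, ?_⟩
  · intro e he
    obtain ⟨r, c, col, rfl, hin, hcol⟩ := hok e he
    have hmd : pvMind ss r c = some 0 := by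
      rw [pv_mind_some_iff]
      exact ⟨⟨[r, c, col], he, pv_dd_zero.mpr ⟨rfl, rfl⟩⟩,
        fun s _ => pv_dd_nonneg s r c⟩
    exact ⟨r, c, col, rfl, hin, hcol, hmd, [r, c, col], he,
      pv_dd_zero.mpr ⟨rfl, rfl⟩, rfl⟩
  · refine pv_pairwise_key_clr ss ?_ hsort
    intro x hx
    obtain ⟨r, c, col, rfl, _, _⟩ := hok x hx
    rfl
  · intro i j hij hmd
    obtain ⟨s1, hs1, hd1, hclr1⟩ := pv_mx_attained (pv_mind_some_iff.mp hmd).1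
    obtain ⟨r, c, col, rfl, _, _⟩ := hok s1 hs1
    obtain ⟨hr, hc⟩ := pv_dd_zero.mp hd1
    exact ⟨[r, c, col], hs1, hr, hc, hclr1⟩

theorem pv_A_char {n m : Int} {sources : List (List Int)} (hpre : Pre_colorGrid n m sources) :
    pvDims n m (colorGrid n m sources) ∧
      ∀ i j, pvIn n m i j → pvGetCell (colorGrid n m sources) i j
        = pvValF (PySem.List.sorted sources pvKey true) i j := by
  have hok := pv_ok_sorted hpre
  have hG0 := pv_G0 (n := n) (m := m) hok
  have hQ0 := pv_Q0 hok (PySem.List.sorted_pairwise_rev sources pvKey)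
  have hd1 := hG0.1
  have hfuel : pvZeros (pvSeed (List.replicate n.toNat (List.replicate m.toNat 0))
      (PySem.List.sorted sources pvKey true)) + 2 ≤ n.toNat * m.toNat + 2 := by
    have := pv_zeros_le hd1
    omega
  exact pv_loop hok _ _ _ 0 _ rfl le_rfl hG0 hQ0 hfuel

-- ---------- B computes pvValF, cell by cell ----------

theorem pv_min_concat (l : List Int) (a : Int) :
    (l ++ [a]).min? = some (match l.min? with | none => a | some v => min v a) := by
  induction l with
  | nil => simp
  | cons x t ih =>
    cases h : t.min? with
    | none =>
      rw [List.min?_eq_none_iff] at h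
      subst h; simp
    | some v =>
      rw [List.cons_append, List.min?_cons', List.min?_cons'] at *
      cases h2 : (t ++ [a]).min? with
      | none => simp at h2
      | some w => simp_all

theorem pv_mind_append (ss : List (List Int)) (s : List Int) (i j : Int) :
    pvMind (ss ++ [s]) i j
      = some (match pvMind ss i j with | none => pvDd s i j | some d => min d (pvDd s i j)) := by
  unfold pvMind
  rw [List.map_append, List.map_singleton, pv_min_concat]

theorem pv_atD_nil_of_lt {ss : List (List Int)} {i j d D : Int}
    (hm : pvMind ss i j = some d) (hlt : D < d) : pvAtD ss i j D = [] := by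
  rw [pvAtD, List.filter_eq_nil_iff]
  intro s hs
  have := (pv_mind_some_iff.mp hm).2 s hs
  simp only [beq_iff_eq]
  omega

theorem pv_mx_append_eq {ss : List (List Int)} {s : List Int} {i j d : Int}
    (hd : pvDd s i j = d) :
    pvMx (ss ++ [s]) i j d
      = match ((pvAtD ss i j d).map pvClr).max? with
        | none => pvClr s
        | some v => max v (pvClr s) := by
  unfold pvMx
  rw [pvAtD, List.filter_append,
    show List.filter (fun s' => pvDd s' i j == d) [s] = [s] by simp [hd],
    List.map_append, List.map_singleton, pv_max_concat, Option.getD_some]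
  rfl

theorem pv_mx_append_ne {ss : List (List Int)} {s : List Int} {i j d : Int}
    (hd : pvDd s i j ≠ d) : pvMx (ss ++ [s]) i j d = pvMx ss i j d := by
  unfold pvMx
  rw [pvAtD, List.filter_append,
    show List.filter (fun s' => pvDd s' i j == d) [s] = [] by simp [hd],
    List.append_nil]
  rfl

theorem pv_mx_max?_some {ss : List (List Int)} {i j d : Int}
    (h : ∃ s ∈ ss, pvDd s i j = d) :
    ((pvAtD ss i j d).map pvClr).max? = some (pvMx ss i j d) := by
  obtain ⟨s, hs, hds⟩ := h
  have hmem : pvClr s ∈ (pvAtD ss i j d).map pvClr :=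
    List.mem_map.mpr ⟨s, List.mem_filter.mpr ⟨hs, by simpa using hds⟩, rfl⟩
  cases hmax : ((pvAtD ss i j d).map pvClr).max? with
  | none => rw [List.max?_eq_none_iff] at hmax; rw [hmax] at hmem; simp at hmem
  | some v => rw [pvMx, hmax, Option.getD_some]

theorem pv_best_fold {n m i j : Int} :
    ∀ {ss : List (List Int)}, pvOkList n m ss →
      ss.foldl (pvBestStep i j) none
        = match pvMind ss i j with
          | none => none
          | some d => some (d, pvMx ss i j d) := by
  intro ss
  induction ss using List.reverseRecOn with
  | nil => intro _; simp [pvMind]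
  | append_singleton t s ih =>
    intro hok
    obtain ⟨r, c, col, rfl, hin, hcol⟩ := hok s (by simp)
    have hokt : pvOkList n m t := fun s hs => hok s (by simp [hs])
    rw [List.foldl_append, List.foldl_cons, List.foldl_nil, ih hokt,
      pv_mind_append]
    have hD : pvDd [r, c, col] i j = |r - i| + |c - j| := rfl
    cases hm : pvMind t i j with
    | none =>
      have ht : t = [] := pv_mind_none_iff.mp hm
      subst ht
      show pvBestStep i j none [r, c, col] = _
      simp only [pvBestStep]
      have hmx : pvMx ([] ++ [[r, c, col]]) i j (pvDd [r, c, col] i j) = col := by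
        rw [pv_mx_append_eq rfl]
        simp [pvAtD]
        rfl
      simp only [List.nil_append] at hmx
      simp only [hD] at hmx ⊢
      simp [hmx]
    | some d =>
      show pvBestStep i j (some (d, pvMx t i j d)) [r, c, col] = _
      simp only [pvBestStep]
      by_cases hlt : |r - i| + |c - j| < d
      · rw [if_pos (Or.inl hlt)]
        have hnil : pvAtD t i j (|r - i| + |c - j|) = [] := pv_atD_nil_of_lt hm hlt
        have hmx : pvMx (t ++ [[r, c, col]]) i j (|r - i| + |c - j|) = col := by
          rw [pv_mx_append_eq hD, hnil]
          simp
          rfl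
        rw [show min d (pvDd [r, c, col] i j) = |r - i| + |c - j| by rw [hD]; omega]
        rw [hmx]
      · by_cases heq : |r - i| + |c - j| = d
        · have hmax := pv_mx_max?_some (i := i) (j := j) (pv_mind_some_iff.mp hm).1
          have hmx : pvMx (t ++ [[r, c, col]]) i j d
              = max (pvMx t i j d) col := by
            rw [pv_mx_append_eq (heq ▸ hD), hmax]
            rfl
          rw [show min d (pvDd [r, c, col] i j) = d by rw [hD]; omega]
          by_cases hgt : col > pvMx t i j d
          · rw [if_pos (Or.inr ⟨heq, hgt⟩), hmx, max_eq_right (le_of_lt hgt), heq]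
          · push_neg at hgt
            rw [if_neg (by push_neg; exact ⟨by omega, fun _ => hgt⟩), hmx, max_eq_left hgt]
        · have hgt2 : d < |r - i| + |c - j| := by omega
          rw [if_neg (by push_neg; exact ⟨by omega, fun h => absurd h (by omega)⟩)]
          rw [show min d (pvDd [r, c, col] i j) = d by rw [hD]; omega]
          rw [pv_mx_append_ne (by rw [hD]; omega)]

theorem pv_cellColor_eq {n m i j : Int} {ss : List (List Int)} (hok : pvOkList n m ss) :
    pvCellColor (pvSeedDict ss) ss i j = pvValF ss i j := by
  unfold pvCellColor pvValF
  cases hsd : (pvSeedDict ss).get? (i, j) with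
  | some v => rfl
  | none =>
    rw [pv_best_fold hok]
    cases hmd : pvMind ss i j with
    | none => rfl
    | some d => rfl

theorem pv_get_cast (g : List (List Int)) (idx jdx : Nat)
    (h1 : idx < g.length) (h2 : jdx < (g[idx]).length) :
    pvGetCell g (idx : Int) (jdx : Int) = g[idx][jdx] := by
  unfold pvGetCell
  rw [show ((idx : Int)).toNat = idx by omega, show ((jdx : Int)).toNat = jdx by omega,
    pv_getD_lt _ _ _ h1, pv_getD_lt _ _ _ h2]

-- ===== VERDICT (by name: the statement is the Claim_ definition above) =====
theorem colorGrid_spec : Claim_equal_colorGrid := by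
  intro n m sources _ hpre
  unfold Spec_colorGrid
  obtain ⟨⟨hlen, hrows⟩, hval⟩ := pv_A_char hpre
  have hok := pv_ok_sorted hpre
  show colorGrid n m sources
      = (PySem.List.pyRange 0 n 1).map (fun i =>
          (PySem.List.pyRange 0 m 1).map (fun j =>
            pvCellColor (pvSeedDict (PySem.List.sorted sources pvKey true))
              (PySem.List.sorted sources pvKey true) i j))
  have hlenR : (PySem.List.pyRange 0 n 1).length = n.toNat := by
    rw [PySem.List.length_pyRange_one]; simp
  have hlenRm : (PySem.List.pyRange 0 m 1).length = m.toNat := by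
    rw [PySem.List.length_pyRange_one]; simp
  apply List.ext_getElem
  · rw [hlen, List.length_map, hlenR]
  intro idx h1 h2
  rw [List.getElem_map]
  have hidx : idx < n.toNat := by rw [hlen] at h1; exact h1
  have hrowlen : (colorGrid n m sources)[idx].length = m.toNat :=
    hrows _ (List.getElem_mem h1)
  have hrange : (PySem.List.pyRange 0 n 1)[idx]'(by rw [hlenR]; exact hidx) = (idx : Int) := by
    rw [PySem.List.getElem_pyRange_one]; simp
  apply List.ext_getElem
  · rw [hrowlen, List.length_map, hlenRm]
  intro jdx hj1 hj2
  rw [List.getElem_map]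
  have hjdx : jdx < m.toNat := by rw [hrowlen] at hj1; exact hj1
  have hrangem : (PySem.List.pyRange 0 m 1)[jdx]'(by rw [hlenRm]; exact hjdx) = (jdx : Int) := by
    rw [PySem.List.getElem_pyRange_one]; simp
  simp only [hrange, hrangem]
  have hin : pvIn n m (idx : Int) (jdx : Int) := by
    refine ⟨by omega, by omega, by omega, by omega⟩
  rw [pv_cellColor_eq hok, ← pv_get_cast (colorGrid n m sources) idx jdx h1
    (by rw [hrowlen]; exact hjdx)]
  exact hval _ _ hin
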